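-- pv_equiv track=rewrite | github.com/Crescent0kt/baekjoon | 프로그래머스/0/181876. 소문자로 바꾸기/소문자로 바꾸기.py | solution
-- ===== SOURCE A (Python) =====
-- def solution(myString):
--     answer = ''
--     for m in myString:
--         if ord(m) >= ord('A') and ord(m) <= ord('Z'):
--             answer += chr(ord('a') + ord(m) - ord('A'))
--         else:
--             answer += m
--     return answer
-- ===== SOURCE B (Python) =====
-- def solution(myString):
--     table = str.maketrans(''.join(chr(c) for c in range(65, 91)),
--                           ''.join(chr(c) for c in range(97, 123)))
--     return myString.translate(table)
-- ===== Notes on version B (the rewrite author's own statement) =====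
-- stated objective: idiomatic
-- what changed: Replaces the per-character ord-comparison/arithmetic concatenation loop with a precomputed A-Z to a-z translation table applied in one str.translate pass.
import Mathlib
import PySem

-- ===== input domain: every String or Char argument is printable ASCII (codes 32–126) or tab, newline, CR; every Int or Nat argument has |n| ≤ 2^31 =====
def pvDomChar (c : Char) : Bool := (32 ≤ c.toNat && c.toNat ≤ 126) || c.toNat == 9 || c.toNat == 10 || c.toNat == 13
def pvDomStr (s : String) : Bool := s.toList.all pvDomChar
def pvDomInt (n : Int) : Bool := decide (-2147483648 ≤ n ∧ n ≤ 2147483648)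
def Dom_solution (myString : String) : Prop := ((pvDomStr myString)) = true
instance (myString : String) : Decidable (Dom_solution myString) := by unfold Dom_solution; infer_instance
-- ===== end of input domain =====

-- B replaces A's per-character ord-comparison/arithmetic concatenation loop with a
-- precomputed A→a … Z→z translation table applied in one lookup pass (idiomatic).


-- ===== PORT A =====
def solution (myString : String) : String :=
  myString.toList.foldl (fun answer m =>
    if 65 ≤ m.toNat ∧ m.toNat ≤ 90 then
      answer.push (Char.ofNat (97 + m.toNat - 65))
    else
      answer.push m) ""

-- ===== PORT B =====
-- str.maketrans(chr(65..90), chr(97..122)): a fixed 26-entry char→char Dict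
def pvTable_solution : PySem.Dict Char Char :=
  PySem.Dict.ofList
    (((PySem.List.pyRange 65 91 1).zip (PySem.List.pyRange 97 123 1)).map
      (fun p => (Char.ofNat p.1.toNat, Char.ofNat p.2.toNat)))

-- myString.translate(table): map each char through the table, identity if absent
def solution_alt (myString : String) : String :=
  String.ofList (myString.toList.map (fun c => pvTable_solution.getD c c))

-- ===== PRECONDITION & SPEC =====
def Spec_solution (myString : String) (out : String) : Prop := out = solution_alt myString
instance (myString : String) (out : String) : Decidable (Spec_solution myString out) := by unfold Spec_solution; infer_instance

-- ===== CLAIM (what is proved, stated in full; the proofs are below) =====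
def Claim_equal_solution : Prop := ∀ (myString : String), Dom_solution myString → Spec_solution myString (solution myString)

-- ===== LEMMAS AND PROOFS =====

-- per-character agreement, checked by the kernel over all ASCII codes < 127
theorem pv_char_eq (c : Char) (h : pvDomChar c = true) :
    pvTable_solution.getD c c =
      (if 65 ≤ c.toNat ∧ c.toNat ≤ 90 then Char.ofNat (97 + c.toNat - 65) else c) := by
  have hlt : c.toNat < 127 := by
    simp only [pvDomChar, Bool.or_eq_true, Bool.and_eq_true, decide_eq_true_eq, beq_iff_eq] at h
    omega
  have hall : (List.range 127).all (fun n =>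
      pvTable_solution.getD (Char.ofNat n) (Char.ofNat n) ==
        (if 65 ≤ (Char.ofNat n).toNat ∧ (Char.ofNat n).toNat ≤ 90 then
          Char.ofNat (97 + (Char.ofNat n).toNat - 65) else Char.ofNat n)) = true := by decide
  have := List.all_eq_true.mp hall c.toNat (List.mem_range.mpr hlt)
  rw [Char.ofNat_toNat] at this
  exact beq_iff_eq.mp this

theorem pv_fold_push (f : Char → Char) (l : List Char) (acc : String) :
    l.foldl (fun (a : String) m => a.push (f m)) acc = acc ++ String.ofList (l.map f) := by
  induction l generalizing acc with
  | nil => apply String.ext; simp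
  | cons x xs ih =>
      simp only [List.foldl_cons, List.map_cons, ih]
      apply String.ext
      simp [String.toList_ofList]

-- ===== VERDICT (by name: the statement is the Claim_ definition above) =====
theorem solution_spec : Claim_equal_solution := by
  intro s hdom
  unfold Spec_solution solution solution_alt
  have hbody : s.toList.foldl (fun (answer : String) m =>
      if 65 ≤ m.toNat ∧ m.toNat ≤ 90 then answer.push (Char.ofNat (97 + m.toNat - 65))
      else answer.push m) "" =
      s.toList.foldl (fun (a : String) m =>
        a.push (if 65 ≤ m.toNat ∧ m.toNat ≤ 90 then Char.ofNat (97 + m.toNat - 65) else m)) "" := by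
    induction s.toList using List.reverseRecOn with
    | nil => rfl
    | append_singleton xs x ih =>
        simp only [List.foldl_append, List.foldl_cons, List.foldl_nil, ih]
        split <;> rfl
  rw [hbody, pv_fold_push]
  have hmap : s.toList.map (fun m => if 65 ≤ m.toNat ∧ m.toNat ≤ 90 then Char.ofNat (97 + m.toNat - 65) else m)
      = s.toList.map (fun c => pvTable_solution.getD c c) := by
    apply List.map_congr_left
    intro c hc
    have : pvDomChar c = true := List.all_eq_true.mp hdom c hc
    exact (pv_char_eq c this).symm
  rw [hmap]
  apply String.ext
  simp
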